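-- pv_equiv track=rewrite | github.com/kevintaing86/ntontm | efsn.py | in_range_f
-- ===== SOURCE A (Python) =====
-- def in_range_f(prmf):
--     if len(prmf) == 0:
--         return False
--
--     x = 1
--     current = prime(x)
--     while current != prmf[-1]:
--         if prmf.count(current) == 0:
--             return False
--         x = x + 1
--         current = prime(x)
--     return True
--
-- def prime(i):
--     """
--     returns the ith prime number
--     :param i: index
--     :return: prime number
--     """
--     num = 1
--     while i != 0:
--         num = num + 1
--         if is_prime(num):
--             i = i - 1
--     return num
--
-- def is_prime(num):
--     """
--     Returns whether a number is prime or not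
--     :param num: a number
--     :return: boolean
--     """
--     if num <= 1:
--         return False
--     for x in range(1, num-1):
--         if x == 1:
--             pass
--         elif num % x == 0:
--             return False
--     return True
-- ===== SOURCE B (Python) =====
-- def in_range_f(prmf):
--     # Single forward scan 2..last with a set, instead of recomputing the
--     # i-th prime from scratch each iteration and scanning the list with count().
--     if len(prmf) == 0:
--         return False
--     last = prmf[-1]
--     s = set(prmf)
--     n = 2
--     while n <= last:
--         if _is_prime(n):
--             if n == last:
--                 return True
--             if n not in s:
--                 return False
--         n = n + 1
--     return False
--
-- def _is_prime(n):
--     if n < 2: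
--         return False
--     d = 2
--     while d * d <= n:
--         if n % d == 0:
--             return False
--         d = d + 1
--     return True
-- ===== Notes on version B (the rewrite author's own statement) =====
-- stated objective: alternative
-- what changed: B replaces A's loop that recomputes the i-th prime from scratch (full trial division for every candidate number) and rescans the list with count() at each step by a single forward scan from 2 up to the last element, with sqrt-bounded trial division and one prebuilt set for membership; on typical inputs both exit at the first missing prime, so the measured cost is similar.
import Mathlib
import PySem

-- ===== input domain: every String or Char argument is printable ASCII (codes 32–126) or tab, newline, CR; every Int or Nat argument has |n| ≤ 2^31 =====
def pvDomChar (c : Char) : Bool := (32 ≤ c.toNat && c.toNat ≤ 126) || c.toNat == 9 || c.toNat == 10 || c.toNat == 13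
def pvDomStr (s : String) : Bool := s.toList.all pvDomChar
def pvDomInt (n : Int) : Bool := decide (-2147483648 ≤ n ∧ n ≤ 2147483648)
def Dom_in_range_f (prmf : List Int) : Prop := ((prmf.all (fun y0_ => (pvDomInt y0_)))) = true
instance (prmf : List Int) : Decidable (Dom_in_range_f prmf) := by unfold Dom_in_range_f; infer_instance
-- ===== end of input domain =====

-- B replaces A's "recompute the i-th prime from scratch and scan the list with count()
-- at every step" loop by one forward scan n = 2..last with sqrt trial division and a set.
-- The while-loops are ported with explicit fuel (a totality guard only: the fuel is
-- proved sufficient below, so it never changes the computed value).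

-- ===== PORT A =====
-- is_prime(num): trial division over range(1, num-1), x == 1 skipped
def isPrimeA (num : Int) : Bool :=
  if num ≤ 1 then false
  else (PySem.List.pyRange 1 (num - 1) 1).all fun x => x == 1 || !(PySem.Int.mod num x == 0)

-- prime(i): walk num upward from 1, counting primes, until i of them were seen.
-- A only calls it with i ≥ 1 and num stays ≥ 1, so Nat arguments are exact; the
-- fuel 2^i bounds the number of iterations (proved sufficient in primeA_eq below).
def primeGo (i : Nat) (num : Nat) (fuel : Nat) : Nat :=
  if i = 0 then num
  else match fuel with
    | 0 => num
    | f + 1 =>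
      if isPrimeA ((num : Int) + 1) then primeGo (i - 1) (num + 1) f
      else primeGo i (num + 1) f

def primeA (i : Nat) : Nat := primeGo i 1 (2 ^ i)

-- the main while-loop: x = 1; while prime(x) != prmf[-1]: …  (fuel = len(prmf) + 1
-- iterations suffice: each continuing step consumes a distinct list member)
def mainGo (prmf : List Int) (last : Int) (x : Nat) (fuel : Nat) : Bool :=
  if (primeA x : Int) = last then true
  else if PySem.List.count prmf ((primeA x : Int)) = 0 then false
  else match fuel with
    | 0 => false
    | f + 1 => mainGo prmf last (x + 1) f

def in_range_f (prmf : List Int) : Bool :=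
  if prmf.length = 0 then false
  else mainGo prmf ((PySem.List.pyGet? prmf (-1)).getD 0) 1 (prmf.length + 1)

-- ===== PORT B =====
-- _is_prime(n): trial division by d while d*d <= n (fuel: d walks from 2 to at most n)
def sqrtGo (n : Int) (d : Int) (fuel : Nat) : Bool :=
  if d * d ≤ n then
    match fuel with
    | 0 => true
    | f + 1 => if PySem.Int.mod n d = 0 then false else sqrtGo n (d + 1) f
  else true

def isPrimeB (n : Int) : Bool := if n < 2 then false else sqrtGo n 2 (n - 1).toNat

-- while n <= last: … n = n + 1  (fuel: n walks from 2 to at most last)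
def bGo (last : Int) (s : PySem.Set Int) (n : Int) (fuel : Nat) : Bool :=
  if n ≤ last then
    match fuel with
    | 0 => false
    | f + 1 =>
      if isPrimeB n then
        if n = last then true
        else if !(PySem.Set.contains s n) then false
        else bGo last s (n + 1) f
      else bGo last s (n + 1) f
  else false

def in_range_f_alt (prmf : List Int) : Bool :=
  if prmf.length = 0 then false
  else
    bGo ((PySem.List.pyGet? prmf (-1)).getD 0) (PySem.Set.ofList prmf) 2
      (((PySem.List.pyGet? prmf (-1)).getD 0 - 1).toNat)

-- ===== PRECONDITION & SPEC =====
def Spec_in_range_f (prmf : List Int) (out : Bool) : Prop := out = in_range_f_alt prmf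
instance (prmf : List Int) (out : Bool) : Decidable (Spec_in_range_f prmf out) := by unfold Spec_in_range_f; infer_instance

-- ===== CLAIM (what is proved, stated in full; the proofs are below) =====
def Claim_equal_in_range_f : Prop := ∀ (prmf : List Int), Dom_in_range_f prmf → Spec_in_range_f prmf (in_range_f prmf)


-- ===== LEMMAS AND PROOFS =====

-- `np n` = the least prime above n (proof-side device)
theorem np_exists (n : Nat) : ∃ p, n < p ∧ Nat.Prime p := by
  obtain ⟨p, hp, hpp⟩ := Nat.exists_infinite_primes (n + 1)
  exact ⟨p, by omega, hpp⟩

def np (n : Nat) : Nat := Nat.find (np_exists n)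

theorem np_gt (n : Nat) : n < np n := (Nat.find_spec (np_exists n)).1

theorem np_prime (n : Nat) : Nat.Prime (np n) := (Nat.find_spec (np_exists n)).2

theorem np_min {n q : Nat} (h1 : n < q) (h2 : Nat.Prime q) : np n ≤ q :=
  Nat.find_min' (np_exists n) ⟨h1, h2⟩

-- isPrimeA decides primality
theorem isPrimeA_iff (num : Int) : isPrimeA num = true ↔ 2 ≤ num ∧ Nat.Prime num.toNat := by
  unfold isPrimeA
  by_cases h : num ≤ 1
  · simp only [if_pos h, Bool.false_eq_true, false_iff]
    rintro ⟨h2, -⟩; omega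
  · rw [if_neg h, List.all_eq_true]
    constructor
    · intro hall
      refine ⟨by omega, ?_⟩
      rw [Nat.prime_def_lt']
      refine ⟨by omega, fun m h2m hmlt hdvd => ?_⟩
      have hdvdI : (m : Int) ∣ num := by
        have : ((m : Nat) : Int) ∣ ((num.toNat : Int)) := Int.natCast_dvd_natCast.mpr hdvd
        rwa [Int.toNat_of_nonneg (by omega)] at this
      by_cases hm : (m : Int) < num - 1
      · have hx := hall (m : Int) (PySem.List.mem_pyRange_one.mpr ⟨by omega, by omega⟩)
        simp only [Bool.or_eq_true, beq_iff_eq, Bool.not_eq_true', beq_eq_false_iff_ne,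
          ne_eq] at hx
        rcases hx with hx | hx
        · omega
        · exact hx ((PySem.Int.mod_eq_zero_iff_dvd num (m : Int)).mpr hdvdI)
      · -- m = num.toNat - 1 : then m divides num.toNat - m = 1, impossible
        have hsub : m ∣ num.toNat - m := Nat.dvd_sub hdvd dvd_rfl
        have h1 : num.toNat - m = 1 := by omega
        rw [h1] at hsub
        have := Nat.le_of_dvd (by omega) hsub
        omega
    · rintro ⟨h2, hp⟩ x hx
      rw [PySem.List.mem_pyRange_one] at hx
      simp only [Bool.or_eq_true, beq_iff_eq, Bool.not_eq_true', beq_eq_false_iff_ne, ne_eq]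
      by_cases hx1 : x = 1
      · exact Or.inl hx1
      · refine Or.inr fun hmod => ?_
        rw [PySem.Int.mod_eq_zero_iff_dvd] at hmod
        have hxN : x.toNat ∣ num.toNat := by
          have : ((x.toNat : Nat) : Int) ∣ ((num.toNat : Nat) : Int) := by
            rwa [Int.toNat_of_nonneg (by omega : (0:Int) ≤ x),
              Int.toNat_of_nonneg (by omega : (0:Int) ≤ num)]
          exact_mod_cast this
        exact (Nat.prime_def_lt'.mp hp).2 x.toNat (by omega) (by omega) hxN

theorem not_prime_of_isPrimeA_false (num : Nat) (h : ¬ isPrimeA ((num : Int) + 1) = true) :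
    ¬ Nat.Prime (num + 1) := by
  intro hp
  apply h
  rw [isPrimeA_iff]
  refine ⟨by have := hp.two_le; omega, ?_⟩
  rwa [show ((num : Int) + 1).toNat = num + 1 by omega]

theorem np_succ (num : Nat) (hnprime : ¬ Nat.Prime (num + 1)) : np (num + 1) = np num := by
  have hg := np_gt num
  have hg1 := np_gt (num + 1)
  have h1 : num + 1 < np num := by
    rcases Nat.lt_or_ge (num + 1) (np num) with h' | h'
    · exact h'
    · exfalso
      apply hnprime
      have heq : np num = num + 1 := by omega
      rw [← heq]
      exact np_prime num
  exact le_antisymm (np_min h1 (np_prime num)) (np_min (by omega) (np_prime (num + 1)))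

-- the reference value of prime(i): i-fold "next prime" iteration
def npIter : Nat → Nat → Nat
  | 0, num => num
  | i + 1, num => npIter i (np num)

theorem npIter_ge (i num : Nat) : num ≤ npIter i num := by
  induction i generalizing num with
  | zero => simp [npIter]
  | succ j ih =>
    have h1 := np_gt num
    have h2 := ih (np num)
    show num ≤ npIter j (np num)
    omega

theorem np_le_two_mul (num : Nat) (h : 1 ≤ num) : np num ≤ 2 * num := by
  obtain ⟨p, hp, h1, h2⟩ := Nat.exists_prime_lt_and_le_two_mul num (by omega)
  exact le_trans (np_min h1 hp) h2

theorem npIter_le (i num : Nat) (h : 1 ≤ num) : npIter i num ≤ 2 ^ i * num := by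
  induction i generalizing num with
  | zero => simp [npIter]
  | succ j ih =>
    have h1 : 1 ≤ np num := by have := np_gt num; omega
    calc npIter (j + 1) num = npIter j (np num) := rfl
      _ ≤ 2 ^ j * np num := ih (np num) h1
      _ ≤ 2 ^ j * (2 * num) := Nat.mul_le_mul_left _ (np_le_two_mul num h)
      _ = 2 ^ (j + 1) * num := by ring

theorem primeGo_eq (fuel i num : Nat) (h : npIter i num - num ≤ fuel) :
    primeGo i num fuel = npIter i num := by
  induction fuel generalizing i num with
  | zero =>
    match i with
    | 0 => rw [primeGo, if_pos rfl]; rfl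
    | i' + 1 =>
      exfalso
      have h1 : np num ≤ npIter i' (np num) := npIter_ge i' (np num)
      have h2 := np_gt num
      have h3 : npIter (i' + 1) num = npIter i' (np num) := rfl
      omega
  | succ f ih =>
    match i with
    | 0 => rw [primeGo, if_pos rfl]; rfl
    | i' + 1 =>
      rw [primeGo, if_neg (by omega : ¬ i' + 1 = 0)]
      show (if isPrimeA ((num : Int) + 1) then primeGo (i' + 1 - 1) (num + 1) f
        else primeGo (i' + 1) (num + 1) f) = npIter (i' + 1) num
      by_cases hp : isPrimeA ((num : Int) + 1) = true
      · rw [if_pos hp]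
        simp only [Nat.add_sub_cancel]
        have hprime : Nat.Prime (num + 1) := by
          have h2 := (isPrimeA_iff _).mp hp
          rw [show ((num : Int) + 1).toNat = num + 1 by omega] at h2
          exact h2.2
        have hnp : np num = num + 1 :=
          le_antisymm (np_min (by omega) hprime) (np_gt num)
        have heq : npIter (i' + 1) num = npIter i' (num + 1) := by
          show npIter i' (np num) = npIter i' (num + 1)
          rw [hnp]
        rw [heq]
        apply ih
        have hge : num + 1 ≤ npIter i' (num + 1) := npIter_ge i' (num + 1)
        omega
      · rw [if_neg hp]
        have hnprime : ¬ Nat.Prime (num + 1) := not_prime_of_isPrimeA_false num hp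
        have hnp : np (num + 1) = np num := np_succ num hnprime
        have heq : npIter (i' + 1) (num + 1) = npIter (i' + 1) num := by
          show npIter i' (np (num + 1)) = npIter i' (np num)
          rw [hnp]
        rw [← heq]
        apply ih
        have hge : np num ≤ npIter i' (np num) := npIter_ge i' (np num)
        have hgt := np_gt num
        have hne : np num ≠ num + 1 := fun he => hnprime (he ▸ np_prime num)
        have h3 : npIter (i' + 1) num = npIter i' (np num) := rfl
        omega

theorem primeA_eq (i : Nat) : primeA i = npIter i 1 := by
  apply primeGo_eq
  have h1 : npIter i 1 ≤ 2 ^ i := by simpa using npIter_le i 1 (le_refl 1)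
  omega

theorem npIter_shift (i num : Nat) : npIter (i + 1) num = np (npIter i num) := by
  induction i generalizing num with
  | zero => rfl
  | succ j ih =>
    show npIter (j + 1) (np num) = np (npIter (j + 1) num)
    rw [show npIter (j + 1) num = npIter j (np num) from rfl]
    exact ih (np num)

theorem primeA_succ (x : Nat) : primeA (x + 1) = np (primeA x) := by
  rw [primeA_eq, primeA_eq, npIter_shift]

theorem primeA_lt (x : Nat) : primeA x < primeA (x + 1) := by
  rw [primeA_succ]; exact np_gt _

theorem primeA_prime (x : Nat) : Nat.Prime (primeA (x + 1)) := by
  rw [primeA_succ]; exact np_prime _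

theorem primeA_one : primeA 1 = 2 := by
  have h2 : np 1 = 2 := le_antisymm (np_min (by omega) Nat.prime_two) (np_gt 1)
  rw [primeA_eq, show npIter 1 1 = np 1 from rfl, h2]

-- strict filter-length decrease used by the main loop's fuel/termination arguments
theorem length_filter_lt_of_imp {α : Type} (p q : α → Bool) (l : List α)
    (himp : ∀ z, q z = true → p z = true) (a : α) (ha : a ∈ l)
    (hpa : p a = true) (hqa : q a = false) :
    (l.filter q).length < (l.filter p).length := by
  induction l with
  | nil => cases ha
  | cons b t ih =>
    rcases List.mem_cons.mp ha with rfl | hat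
    · rw [List.filter_cons, List.filter_cons, if_pos hpa, if_neg (by simp [hqa])]
      have : (t.filter q).length ≤ (t.filter p).length := by
        have : t.filter q = (t.filter p).filter q := by
          rw [List.filter_filter]
          apply List.filter_congr
          intro z _
          cases hq : q z
          · simp
          · simp [himp z hq]
        rw [this]
        exact List.length_filter_le _ _
      simpa using Nat.lt_succ_of_le this
    · cases hb : q b
      · rw [List.filter_cons, List.filter_cons, if_neg (by simp [hb])]
        have := ih hat
        cases hpb : p b <;> simp <;> omega
      · rw [List.filter_cons, List.filter_cons, if_pos hb, if_pos (himp b hb)]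
        simpa using ih hat

-- fuel-free reference version of the main loop
def mainLoop (prmf : List Int) (last : Int) (x : Nat) : Bool :=
  if (primeA x : Int) = last then true
  else if PySem.List.count prmf (primeA x : Int) = 0 then false
  else mainLoop prmf last (x + 1)
termination_by (prmf.filter (fun z => decide ((primeA x : Int) ≤ z))).length
decreasing_by
  have hmem : (primeA x : Int) ∈ prmf := by
    by_contra hn
    apply ‹¬ PySem.List.count prmf (primeA x : Int) = 0›
    rw [PySem.List.count_eq]
    exact List.count_eq_zero.mpr hn
  have hc : (primeA x : Int) < (primeA (x + 1) : Int) := by exact_mod_cast primeA_lt x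
  exact length_filter_lt_of_imp _ _ prmf
    (fun z hz => by simp only [decide_eq_true_eq] at hz ⊢; omega)
    ((primeA x : Int)) hmem (by simp) (by simp; omega)

-- the fuel len(prmf)+1 is sufficient: mainGo computes mainLoop
theorem mainGo_eq (prmf : List Int) (last : Int) (fuel x : Nat)
    (h : (prmf.filter (fun z => decide ((primeA x : Int) ≤ z))).length < fuel) :
    mainGo prmf last x fuel = mainLoop prmf last x := by
  induction fuel generalizing x with
  | zero => omega
  | succ f ih =>
    rw [mainLoop, mainGo]
    by_cases h1 : (primeA x : Int) = last
    · rw [if_pos h1, if_pos h1]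
    · rw [if_neg h1, if_neg h1]
      by_cases h2 : PySem.List.count prmf ((primeA x : Int)) = 0
      · rw [if_pos h2, if_pos h2]
      · rw [if_neg h2, if_neg h2]
        show mainGo prmf last (x + 1) f = mainLoop prmf last (x + 1)
        apply ih
        have hmem : (primeA x : Int) ∈ prmf := by
          by_contra hn
          exact h2 (by rw [PySem.List.count_eq]; exact List.count_eq_zero.mpr hn)
        have hc : (primeA x : Int) < (primeA (x + 1) : Int) := by exact_mod_cast primeA_lt x
        have hdec := length_filter_lt_of_imp
          (fun z => decide ((primeA x : Int) ≤ z)) (fun z => decide ((primeA (x + 1) : Int) ≤ z))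
          prmf (fun z hz => by simp only [decide_eq_true_eq] at hz ⊢; omega)
          ((primeA x : Int)) hmem (by simp) (by simp; omega)
        omega

-- fuel-free reference version of _is_prime's inner loop
def sqrtLoopB (n : Int) (d : Int) : Bool :=
  if d * d ≤ n then
    if PySem.Int.mod n d = 0 then false else sqrtLoopB n (d + 1)
  else true
termination_by (n + 1 - d).toNat
decreasing_by
  have hdn : d ≤ n := by
    nlinarith [mul_self_nonneg (d - 1), mul_self_nonneg d]
  omega

theorem sqrtLoopB_iff (n d : Int) (hd : 2 ≤ d) :
    sqrtLoopB n d = true ↔ ∀ e : Int, d ≤ e → e * e ≤ n → ¬ e ∣ n := by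
  by_cases hle : d * d ≤ n
  · by_cases hmod : PySem.Int.mod n d = 0
    · rw [sqrtLoopB, if_pos hle, if_pos hmod]
      simp only [Bool.false_eq_true, false_iff, not_forall]
      push_neg
      exact ⟨d, le_refl d, hle, (PySem.Int.mod_eq_zero_iff_dvd n d).mp hmod⟩
    · rw [sqrtLoopB, if_pos hle, if_neg hmod, sqrtLoopB_iff n (d + 1) (by omega)]
      constructor
      · intro h e hde hee
        rcases eq_or_lt_of_le hde with heq | hlt
        · subst heq
          exact fun hdvd => hmod ((PySem.Int.mod_eq_zero_iff_dvd n d).mpr hdvd)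
        · exact h e (by omega) hee
      · intro h e hde hee
        exact h e (by omega) hee
  · rw [sqrtLoopB, if_neg hle]
    simp only [true_iff]
    intro e hde hee hdvd
    have : d * d ≤ e * e := mul_le_mul hde hde (by omega) (by omega)
    omega
termination_by (n + 1 - d).toNat
decreasing_by
  have hdn : d ≤ n := by
    nlinarith [mul_self_nonneg (d - 1), mul_self_nonneg d]
  omega

-- the fuel (n-1).toNat is sufficient: sqrtGo computes sqrtLoopB
theorem sqrtGo_eq (n : Int) (fuel : Nat) (d : Int)
    (h : d * d ≤ n → (n - d).toNat < fuel) :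
    sqrtGo n d fuel = sqrtLoopB n d := by
  induction fuel generalizing d with
  | zero =>
    by_cases hle : d * d ≤ n
    · exact absurd (h hle) (by omega)
    · rw [sqrtGo, if_neg hle, sqrtLoopB, if_neg hle]
  | succ f ih =>
    by_cases hle : d * d ≤ n
    · rw [sqrtGo, if_pos hle, sqrtLoopB, if_pos hle]
      show (if PySem.Int.mod n d = 0 then false else sqrtGo n (d + 1) f) = _
      by_cases hmod : PySem.Int.mod n d = 0
      · rw [if_pos hmod, if_pos hmod]
      · rw [if_neg hmod, if_neg hmod]
        apply ih
        intro hle'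
        have hdn : d + 1 ≤ n := by
          nlinarith [mul_self_nonneg d, mul_self_nonneg (d + 1)]
        have := h hle
        omega
    · rw [sqrtGo, if_neg hle, sqrtLoopB, if_neg hle]

theorem isPrimeB_iff (n : Int) : isPrimeB n = true ↔ 2 ≤ n ∧ Nat.Prime n.toNat := by
  unfold isPrimeB
  by_cases h : n < 2
  · rw [if_pos h]
    simp only [Bool.false_eq_true, false_iff]
    rintro ⟨h2, -⟩
    omega
  · rw [if_neg h, sqrtGo_eq n ((n - 1).toNat) 2 (by intro; omega),
      sqrtLoopB_iff n 2 (le_refl 2)]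
    have hn0 : (0:Int) ≤ n := by omega
    rw [Nat.prime_def_le_sqrt]
    constructor
    · intro hall
      refine ⟨by omega, by omega, fun m h2m hms hdvd => ?_⟩
      have hmm : m * m ≤ n.toNat := Nat.le_sqrt.mp hms
      refine hall (m : Int) (by exact_mod_cast h2m) ?_ ?_
      · rw [show n = (n.toNat : Int) from (Int.toNat_of_nonneg hn0).symm]
        exact_mod_cast hmm
      · rw [show n = (n.toNat : Int) from (Int.toNat_of_nonneg hn0).symm]
        exact_mod_cast hdvd
    · rintro ⟨-, -, hall⟩ e h2e hee hdvd
      have he0 : (0:Int) ≤ e := by omega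
      refine hall e.toNat (by omega) ?_ ?_
      · rw [Nat.le_sqrt]
        have h1 : ((e.toNat * e.toNat : Nat) : Int) ≤ ((n.toNat : Nat) : Int) := by
          push_cast
          rw [Int.toNat_of_nonneg he0, Int.toNat_of_nonneg hn0]
          exact hee
        exact_mod_cast h1
      · have h1 : ((e.toNat : Nat) : Int) ∣ ((n.toNat : Nat) : Int) := by
          rw [Int.toNat_of_nonneg he0, Int.toNat_of_nonneg hn0]
          exact hdvd
        exact_mod_cast h1

-- fuel-free reference version of B's main loop
def bScan (last : Int) (s : PySem.Set Int) (n : Int) : Bool :=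
  if n ≤ last then
    if isPrimeB n then
      if n = last then true
      else if !(PySem.Set.contains s n) then false
      else bScan last s (n + 1)
    else bScan last s (n + 1)
  else false
termination_by (last + 1 - n).toNat
decreasing_by all_goals omega

theorem bScan_gt (last : Int) (s : PySem.Set Int) (n : Int) (h : last < n) :
    bScan last s n = false := by
  rw [bScan, if_neg (by omega)]

theorem bScan_skip (last : Int) (s : PySem.Set Int) (m n : Int) (hnm : n ≤ m)
    (hnop : ∀ q : Int, n ≤ q → q < m → ¬ (2 ≤ q ∧ Nat.Prime q.toNat)) :
    bScan last s n = bScan last s m := by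
  by_cases h : n = m
  · rw [h]
  · have hlt : n < m := by omega
    have hnp : ¬ isPrimeB n = true := fun htrue =>
      hnop n (le_refl n) hlt ((isPrimeB_iff n).mp htrue)
    by_cases hle : n ≤ last
    · rw [bScan, if_pos hle, if_neg hnp]
      exact bScan_skip last s m (n + 1) (by omega) (fun q h1 h2 => hnop q (by omega) h2)
    · rw [bScan_gt last s n (by omega), bScan_gt last s m (by omega)]
termination_by (m - n).toNat

-- the fuel (last-1).toNat is sufficient: bGo computes bScan
theorem bGo_eq (last : Int) (s : PySem.Set Int) (fuel : Nat) (n : Int)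
    (h : n ≤ last → (last - n).toNat < fuel) :
    bGo last s n fuel = bScan last s n := by
  induction fuel generalizing n with
  | zero =>
    by_cases hle : n ≤ last
    · exact absurd (h hle) (by omega)
    · rw [bGo, if_neg hle, bScan_gt last s n (by omega)]
  | succ f ih =>
    by_cases hle : n ≤ last
    · rw [bGo, if_pos hle, bScan, if_pos hle]
      show (if isPrimeB n then
          if n = last then true
          else if !(PySem.Set.contains s n) then false
          else bGo last s (n + 1) f
        else bGo last s (n + 1) f) = _
      have hrec : bGo last s (n + 1) f = bScan last s (n + 1) := by
        apply ih
        intro hle'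
        have := h hle
        omega
      by_cases hp : isPrimeB n = true
      · rw [if_pos hp, if_pos hp]
        by_cases h1 : n = last
        · rw [if_pos h1, if_pos h1]
        · rw [if_neg h1, if_neg h1, hrec]
      · rw [if_neg hp, if_neg hp, hrec]
    · rw [bGo, if_neg hle, bScan_gt last s n (by omega)]

-- the central simulation: A's prime-by-prime loop equals B's forward scan
theorem main_sim (prmf : List Int) (last : Int) (y : Nat) :
    mainLoop prmf last (y + 1) = bScan last (PySem.Set.ofList prmf) ((primeA (y + 1) : Int)) := by
  have hcp : Nat.Prime (primeA (y + 1)) := primeA_prime y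
  have hc2 : (2 : Int) ≤ (primeA (y + 1) : Int) := by exact_mod_cast hcp.two_le
  have hBc : isPrimeB ((primeA (y + 1) : Int)) = true := by
    rw [isPrimeB_iff]
    exact ⟨hc2, by simpa using hcp⟩
  by_cases h1 : (primeA (y + 1) : Int) = last
  · rw [mainLoop, if_pos h1, bScan, if_pos (by omega), if_pos hBc, if_pos h1]
  · by_cases h2 : PySem.List.count prmf ((primeA (y + 1) : Int)) = 0
    · have hnotmem : (primeA (y + 1) : Int) ∉ prmf := by
        rw [PySem.List.count_eq] at h2
        exact List.count_eq_zero.mp h2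
      rw [mainLoop, if_neg h1, if_pos h2]
      by_cases hle : (primeA (y + 1) : Int) ≤ last
      · have hcont : ¬ PySem.Set.contains (PySem.Set.ofList prmf) ((primeA (y + 1) : Int)) = true :=
          fun ht => hnotmem ((PySem.Set.mem_ofList _ _).mp ((PySem.Set.contains_iff _ _).mp ht))
        rw [bScan, if_pos hle, if_pos hBc, if_neg h1, if_pos (by simpa using hcont)]
      · rw [bScan_gt _ _ _ (by omega)]
    · have hmem : (primeA (y + 1) : Int) ∈ prmf := by
        by_contra hn
        exact h2 (by rw [PySem.List.count_eq]; exact List.count_eq_zero.mpr hn)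
      rw [mainLoop, if_neg h1, if_neg h2]
      rw [main_sim prmf last (y + 1)]
      have hlt : primeA (y + 1) < primeA (y + 1 + 1) := primeA_lt (y + 1)
      have hnext : primeA (y + 1 + 1) = np (primeA (y + 1)) := primeA_succ (y + 1)
      have hskip : ∀ q : Int, (primeA (y + 1) : Int) + 1 ≤ q → q < (primeA (y + 1 + 1) : Int) →
          ¬ (2 ≤ q ∧ Nat.Prime q.toNat) := by
        rintro q hq1 hq2 ⟨hq2', hqp⟩
        have hqa : primeA (y + 1) < q.toNat := by omega
        have hqb : q.toNat < primeA (y + 1 + 1) := by omega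
        rw [hnext] at hqb
        exact absurd (np_min hqa hqp) (by omega)
      by_cases hle : (primeA (y + 1) : Int) ≤ last
      · have hcont : PySem.Set.contains (PySem.Set.ofList prmf) ((primeA (y + 1) : Int)) = true :=
          (PySem.Set.contains_iff _ _).mpr ((PySem.Set.mem_ofList _ _).mpr hmem)
        rw [show bScan last (PySem.Set.ofList prmf) ((primeA (y + 1) : Int))
              = bScan last (PySem.Set.ofList prmf) ((primeA (y + 1) : Int) + 1) from by
            rw [bScan, if_pos hle, if_pos hBc, if_neg h1, if_neg (by simpa using hcont)]]
        exact (bScan_skip last (PySem.Set.ofList prmf) _ _ (by exact_mod_cast hlt) hskip).symm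
      · rw [bScan_gt _ _ ((primeA (y + 1) : Int)) (by omega),
          bScan_gt _ _ ((primeA (y + 1 + 1) : Int)) (by omega)]
termination_by (prmf.filter (fun z => decide ((primeA (y + 1) : Int) ≤ z))).length
decreasing_by
  have hc : (primeA (y + 1) : Int) < (primeA (y + 1 + 1) : Int) := by
    exact_mod_cast primeA_lt (y + 1)
  exact length_filter_lt_of_imp _ _ prmf
    (fun z hz => by simp only [decide_eq_true_eq] at hz ⊢; omega)
    ((primeA (y + 1) : Int)) hmem (by simp) (by simp; omega)

-- ===== VERDICT (by name: the statement is the Claim_ definition above) =====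
theorem in_range_f_spec : Claim_equal_in_range_f := by
  intro prmf _
  unfold Spec_in_range_f in_range_f in_range_f_alt
  by_cases h : prmf.length = 0
  · rw [if_pos h, if_pos h]
  · rw [if_neg h, if_neg h]
    rw [mainGo_eq prmf _ (prmf.length + 1) 1
      (by have := List.length_filter_le (fun z => decide ((primeA 1 : Int) ≤ z)) prmf; omega)]
    rw [bGo_eq _ (PySem.Set.ofList prmf) _ 2 (by intro hle; omega)]
    rw [show (1:Nat) = 0 + 1 from rfl, main_sim, primeA_one]
    norm_num
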